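-- pv_equiv track=rewrite | github.com/rashi174/Codewars | binary_gap.py | solution
-- ===== SOURCE A (Python) =====
-- def solution(N):
--     # write your code in Python 2.7
--     #Turn int to binary list
--     binary = bin(N)[2:]
--     #store all the binary gap lengths here
--     binary_gap_lengths = []
--     #consecutive gap count
--     gap_count = 0
--     for i in binary:
--         #if i=0, add 1 to gap count
--         if i == '0':
--             gap_count += 1
--         #if i=1 and gap count is greater than 0
--         #i.e. the binary gap has just ended
--         if gap_count > 0 and i == '1':
--             #Add the gap count to the binary_gap_lengths list
--             binary_gap_lengths.append(gap_count)
--             #then reset the gap count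
--             gap_count = 0
--     #if the binary_gap_lengths list is empty
--     #i.e no binary gaps
--     #return 0
--     if not binary_gap_lengths:
--         return 0
--     #if there are binary gaps, return the maximum gap length from the binary_gap_lengths list
--     else:
--         return max(binary_gap_lengths)
-- ===== SOURCE B (Python) =====
-- def solution(N):
--     # longest run of zeros strictly between ones in the binary representation:
--     # strip the trailing (unterminated) zero run, split on '1', take the longest chunk
--     runs = bin(abs(N))[2:].strip('0').split('1')
--     return max((len(run) for run in runs), default=0)
-- ===== Notes on version B (the rewrite author's own statement) =====
-- stated objective: simpler
-- what changed: Replaces the explicit scan with a running gap counter and a list of gap lengths by strip('0') + split('1') on the binary string and a max over chunk lengths.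
import Mathlib
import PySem

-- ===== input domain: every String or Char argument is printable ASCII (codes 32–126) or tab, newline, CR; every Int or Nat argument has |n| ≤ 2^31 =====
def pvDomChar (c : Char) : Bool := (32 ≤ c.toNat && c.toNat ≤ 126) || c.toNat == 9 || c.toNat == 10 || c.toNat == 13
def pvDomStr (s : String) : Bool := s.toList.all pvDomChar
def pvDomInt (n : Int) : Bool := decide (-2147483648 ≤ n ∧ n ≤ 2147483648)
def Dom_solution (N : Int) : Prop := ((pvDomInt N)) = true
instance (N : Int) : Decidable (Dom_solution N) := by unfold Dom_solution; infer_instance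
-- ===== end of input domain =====

-- B replaces A's explicit gap-counter scan by strip('0') + split('1') and a max over chunk lengths (simpler decomposition, same cost).


-- ===== PORT A =====
-- hand port of bin(n) for n : Nat, exact: most-significant bit first, bin(0) = "0"
def toBinAux (n : Nat) (acc : List Char) : List Char :=
  if h : n = 0 then acc
  else toBinAux (n / 2) ((if n % 2 = 1 then '1' else '0') :: acc)
termination_by n
decreasing_by exact Nat.div_lt_self (Nat.pos_of_ne_zero h) (by norm_num)

def binNat (n : Nat) : List Char := if n = 0 then ['0'] else toBinAux n []

-- hand port of bin(N)[2:], exact: for negative N Python gives '-0b…' so [2:] keeps a leading 'b'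
def pyBin (N : Int) : List Char :=
  if N < 0 then 'b' :: binNat (-N).toNat else binNat N.toNat

-- the for-loop of A over (binary, binary_gap_lengths, gap_count)
def solLoop : List Char → List Int → Int → List Int
  | [], gaps, _ => gaps
  | i :: rest, gaps, gap_count =>
    let gc := if i = '0' then gap_count + 1 else gap_count
    if 0 < gc ∧ i = '1' then solLoop rest (gaps ++ [gc]) 0
    else solLoop rest gaps gc

def solution (N : Int) : Int :=
  let gaps := solLoop (pyBin N) [] 0
  if gaps = [] then 0 else (PySem.List.max? gaps (fun x => x)).getD 0

-- ===== PORT B =====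
def solution_alt (N : Int) : Int :=
  let runs := PySem.Chars.splitOn (PySem.Chars.stripChars (binNat N.natAbs) ['0']) ['1']
  (PySem.List.max? (runs.map (fun r => (r.length : Int))) (fun x => x)).getD 0

-- ===== PRECONDITION & SPEC =====
def Spec_solution (N : Int) (out : Int) : Prop := out = solution_alt N
instance (N : Int) (out : Int) : Decidable (Spec_solution N out) := by unfold Spec_solution; infer_instance

-- ===== CLAIM (what is proved, stated in full; the proofs are below) =====
def Claim_equal_solution : Prop := ∀ (N : Int), Dom_solution N → Spec_solution N (solution N)

-- ===== LEMMAS AND PROOFS =====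

-- the list of gap lengths A collects, as a standalone recursion
def gapsOf (gc : Int) : List Char → List Int
  | [] => []
  | i :: t =>
    let g := if i = '0' then gc + 1 else gc
    if 0 < g ∧ i = '1' then g :: gapsOf 0 t else gapsOf g t

-- A's maximum, as a recursion (gc = current run length)
def gA (gc : Int) : List Char → Int
  | [] => 0
  | i :: t => if i = '0' then gA (gc + 1) t else if i = '1' then max gc (gA 0 t) else gA gc t

-- B's maximum over split chunks, as a recursion (k = length of current chunk)
def gB (k : Int) : List Char → Int
  | [] => k
  | c :: t => if c = '1' then max k (gB 0 t) else gB (k + 1) t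

-- split on '1', structurally
def chunks (cur : List Char) : List Char → List (List Char)
  | [] => [cur.reverse]
  | c :: t => if c = '1' then cur.reverse :: chunks [] t else chunks (c :: cur) t

def rstrip0 (l : List Char) : List Char :=
  (l.reverse.dropWhile (fun c => List.contains ['0'] c)).reverse

theorem p0_eq (c : Char) : List.contains ['0'] c = (c == '0') := by
  cases h : (c == '0')
  · simp_all [beq_iff_eq]
  · simp_all [beq_iff_eq]

set_option maxRecDepth 4000 in
theorem solLoop_eq (l : List Char) : ∀ gaps gc, solLoop l gaps gc = gaps ++ gapsOf gc l := by
  induction l with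
  | nil => intro gaps gc; simp [solLoop, gapsOf]
  | cons i t ih =>
    intro gaps gc
    by_cases hi : i = '0'
    · have h1 : i ≠ '1' := by subst hi; decide
      simp [solLoop, gapsOf, hi, h1, ih]
    · by_cases h1 : i = '1'
      · by_cases hgc : 0 < gc <;> simp [solLoop, gapsOf, hi, h1, hgc, ih]
      · simp [solLoop, gapsOf, hi, h1, ih]

theorem mem_gapsOf_pos (l : List Char) : ∀ gc x, x ∈ gapsOf gc l → 0 < x := by
  induction l with
  | nil => intro gc x h; simp [gapsOf] at h
  | cons i t ih =>
    intro gc x h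
    by_cases hi : i = '0'
    · simp [gapsOf, hi] at h
      exact ih _ x h
    · by_cases h1 : i = '1'
      · by_cases hgc : 0 < gc
        · simp [gapsOf, hi, h1, hgc] at h
          rcases h with rfl | h
          · exact hgc
          · exact ih 0 x h
        · simp [gapsOf, hi, h1, hgc] at h
          exact ih _ x h
      · simp [gapsOf, hi, h1] at h
        exact ih _ x h

theorem gA_nonneg (l : List Char) : ∀ gc : Int, 0 ≤ gc → 0 ≤ gA gc l := by
  induction l with
  | nil => intro gc _; simp [gA]
  | cons i t ih =>
    intro gc hgc
    simp only [gA]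
    split
    · exact ih _ (by omega)
    · split
      · have := ih 0 le_rfl; omega
      · exact ih _ hgc

theorem foldl_max_gapsOf (l : List Char) : ∀ (b gc : Int), 0 ≤ b → 0 ≤ gc →
    (gapsOf gc l).foldl max b = max b (gA gc l) := by
  induction l with
  | nil => intro b gc hb _; simp [gapsOf, gA]; omega
  | cons i t ih =>
    intro b gc hb hgc
    by_cases hi : i = '0'
    · simp only [gapsOf, gA, hi, reduceIte]
      simp only [show ('0':Char) ≠ '1' from by decide, and_false, if_false, reduceIte]
      exact ih b (gc + 1) hb (by omega)
    · by_cases h1 : i = '1'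
      · subst h1
        simp only [gapsOf, gA, hi, if_false, reduceIte, and_true]
        by_cases hgc0 : 0 < gc
        · simp only [hgc0, if_pos, List.foldl_cons]
          rw [ih (max b gc) 0 (by omega) le_rfl]
          omega
        · have hgc1 : gc = 0 := by omega
          subst hgc1
          simp only [hgc0, if_false, reduceIte]
          rw [ih b 0 hb le_rfl]
          have hge := gA_nonneg t 0 le_rfl
          omega
      · simp only [gapsOf, gA, hi, h1, if_false, and_false, reduceIte]
        exact ih b gc hb hgc

theorem gB_nonneg (l : List Char) : ∀ k : Int, 0 ≤ k → 0 ≤ gB k l := by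
  induction l with
  | nil => intro k hk; simpa [gB] using hk
  | cons c t ih =>
    intro k hk
    simp only [gB]
    split
    · have := ih 0 le_rfl; omega
    · exact ih _ (by omega)

-- A's return value in terms of foldl max
theorem maxOrZero (g : List Int) (hpos : ∀ x ∈ g, 0 < x) :
    (if g = [] then (0:Int) else (PySem.List.max? g (fun x => x)).getD 0) = g.foldl max 0 := by
  cases g with
  | nil => simp
  | cons x t =>
    have hx : 0 ≤ x := le_of_lt (hpos x List.mem_cons_self)
    rw [if_neg (List.cons_ne_nil x t), PySem.List.max?_id_cons, Option.getD_some, List.foldl_cons]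
    congr 1
    omega

-- ===== splitOn / stripChars characterisation =====

theorem splitOn_go_eq (fuel : Nat) : ∀ (l cur acc : List Char) (accs : List (List Char)),
    l.length ≤ fuel →
    PySem.Chars.splitOn.go ['1'] fuel l cur accs = accs.reverse ++ chunks cur l := by
  induction fuel with
  | zero =>
    intro l cur acc accs hl
    have : l = [] := by cases l <;> simp_all
    subst this
    simp [PySem.Chars.splitOn.go, chunks]
  | succ fuel ih =>
    intro l cur acc accs hl
    cases l with
    | nil => simp [PySem.Chars.splitOn.go, chunks]
    | cons c rest =>
      simp only [PySem.Chars.splitOn.go]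
      by_cases hc : c = '1'
      · subst hc
        have hpre : List.isPrefixOf ['1'] ('1' :: rest) = true := by simp [List.isPrefixOf]
        simp only [hpre, if_pos, List.length_cons, List.length_nil, List.drop_succ_cons, List.drop_zero]
        rw [ih rest [] acc (cur.reverse :: accs) (by simpa using hl)]
        simp [chunks]
      · have hpre : List.isPrefixOf ['1'] (c :: rest) = false := by
          simp [List.isPrefixOf]; exact fun h => (hc h.symm).elim
        simp only [hpre, Bool.false_eq_true, if_false]
        rw [ih rest (c :: cur) acc accs (by simpa using hl)]
        simp [chunks, hc]

theorem splitOn_eq (l : List Char) : PySem.Chars.splitOn l ['1'] = chunks [] l := by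
  have := splitOn_go_eq (l.length + 1) l [] [] [] (by omega)
  simpa [PySem.Chars.splitOn] using this

theorem chunks_fold (l : List Char) : ∀ (cur : List Char) (b : Int),
    ((chunks cur l).map (fun r => (r.length : Int))).foldl max b = max b (gB (cur.length : Int) l) := by
  induction l with
  | nil => intro cur b; simp [chunks, gB]
  | cons c t ih =>
    intro cur b
    simp only [chunks, gB]
    by_cases hc : c = '1'
    · subst hc
      simp only [reduceIte, List.map_cons, List.foldl_cons, List.length_reverse]
      rw [ih [] (max b cur.length)]
      simp only [List.length_nil, Nat.cast_zero]
      omega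
    · rw [if_neg hc, if_neg hc, ih (c :: cur) b]
      simp only [List.length_cons]
      push_cast
      ring_nf

theorem chunks_ne_nil (l : List Char) (cur : List Char) : chunks cur l ≠ [] := by
  induction l generalizing cur with
  | nil => simp [chunks]
  | cons c t ih => simp only [chunks]; split <;> simp [ih]

-- stripChars '0' on a list whose head is not '0' is rstrip0
theorem stripChars_eq (l : List Char) (hhd : l = [] ∨ ∃ t, l = '1' :: t) :
    PySem.Chars.stripChars l ['0'] = rstrip0 l := by
  rw [show PySem.Chars.stripChars l ['0'] =
      (List.dropWhile (fun c => List.contains ['0'] c)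
        (List.dropWhile (fun c => List.contains ['0'] c) l).reverse).reverse from rfl]
  rcases hhd with rfl | ⟨t, rfl⟩
  · rfl
  · rw [List.dropWhile_cons_of_neg (by decide)]
    rfl

-- structural cons rule for rstrip0
theorem rstrip0_cons (c : Char) (t : List Char) :
    rstrip0 (c :: t) = if rstrip0 t = [] then (if c = '0' then [] else [c]) else c :: rstrip0 t := by
  simp only [rstrip0, p0_eq, List.reverse_cons, List.dropWhile_append]
  by_cases ht : List.dropWhile (fun c : Char => c == '0') t.reverse = []
  · simp only [ht, List.isEmpty_nil, if_pos, List.reverse_eq_nil_iff, List.reverse_nil]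
    by_cases hc : c = '0'
    · simp [hc, List.dropWhile]
    · have hcb : (c == '0') = false := by simp [hc]
      simp [List.dropWhile, hcb, hc]
  · have : (List.dropWhile (fun c : Char => c == '0') t.reverse).isEmpty = false := by
      simpa [List.isEmpty_iff] using ht
    simp only [this, Bool.false_eq_true, if_false, List.reverse_append, List.reverse_eq_nil_iff, ht,
      List.reverse_cons]
    simp [List.reverse_eq_nil_iff, ht]

theorem rstrip0_nil_all (l : List Char) (h : rstrip0 l = []) : ∀ c ∈ l, c = '0' := by
  intro c hc
  have := (List.dropWhile_eq_nil_iff).mp (by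
    have : l.reverse.dropWhile (fun c : Char => c == '0') = [] := by
      simpa [rstrip0, p0_eq, List.reverse_eq_nil_iff] using h
    exact this) c (by simpa using hc)
  simpa using this

theorem gA_all_zero (l : List Char) (h : ∀ c ∈ l, c = '0') : ∀ gc : Int, gA gc l = 0 := by
  induction l with
  | nil => intro gc; simp [gA]
  | cons c t ih =>
    intro gc
    have hc : c = '0' := h c List.mem_cons_self
    simp only [gA, hc, if_pos rfl]
    exact ih (fun c hc => h c (List.mem_cons_of_mem _ hc)) _

-- the bridge: A's max equals B's max on the right-stripped list, for 0/1 lists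
theorem bridge (l : List Char) (h01 : ∀ c ∈ l, c = '0' ∨ c = '1') : ∀ gc : Int, 0 ≤ gc →
    (rstrip0 l = [] → gA gc l = 0) ∧ (rstrip0 l ≠ [] → gA gc l = gB gc (rstrip0 l)) := by
  induction l with
  | nil => intro gc _; constructor <;> intro h <;> simp [gA, rstrip0] at h ⊢
  | cons c t ih =>
    intro gc hgc
    have h01t : ∀ c ∈ t, c = '0' ∨ c = '1' := fun c hc => h01 c (List.mem_cons_of_mem _ hc)
    have iht := ih h01t
    rw [rstrip0_cons]
    rcases h01 c List.mem_cons_self with hc | hc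
    · -- c = '0'
      subst hc
      by_cases ht : rstrip0 t = []
      · simp only [ht, if_pos rfl]
        constructor
        · intro _
          exact gA_all_zero _ (by
            intro x hx
            rcases List.mem_cons.mp hx with rfl | hx
            · rfl
            · exact rstrip0_nil_all t ht x hx) gc
        · intro hcontra; simp at hcontra
      · simp only [ht, if_neg, if_false]
        constructor
        · intro hcontra; simp at hcontra
        · intro _
          simp only [gA, gB, if_pos rfl, reduceIte]
          have := (iht (gc + 1) (by omega)).2 ht
          simpa using this
    · -- c = '1'
      subst hc
      have hne : ¬ ('1' : Char) = '0' := by decide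
      by_cases ht : rstrip0 t = []
      · simp only [ht, if_pos rfl, hne, if_false]
        constructor
        · intro hcontra; simp at hcontra
        · intro _
          have hz := gA_all_zero t (rstrip0_nil_all t ht) 0
          simp only [gA, gB, hne, if_false, reduceIte, hz]
          try omega
      · simp only [ht, if_neg, if_false]
        constructor
        · intro hcontra; simp at hcontra
        · intro _
          simp only [gA, gB, hne, if_false, reduceIte]
          rw [(iht 0 le_rfl).2 ht]
-- ===== assembly =====

theorem toBinAux_01 (n : Nat) : ∀ acc, (∀ c ∈ acc, c = '0' ∨ c = '1') →
    ∀ c ∈ toBinAux n acc, c = '0' ∨ c = '1' := by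
  induction n using Nat.strong_induction_on with
  | _ n ih =>
    intro acc hacc
    unfold toBinAux
    split
    · exact hacc
    · rename_i hn
      refine ih (n / 2) (Nat.div_lt_self (Nat.pos_of_ne_zero hn) (by norm_num)) _ ?_
      intro c hc
      rcases List.mem_cons.mp hc with rfl | hc
      · split <;> simp
      · exact hacc c hc

theorem toBinAux_head (n : Nat) (hn : n ≠ 0) : ∀ acc, ∃ t, toBinAux n acc = '1' :: t := by
  induction n using Nat.strong_induction_on with
  | _ n ih =>
    intro acc
    unfold toBinAux
    rw [dif_neg hn]
    by_cases h2 : n / 2 = 0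
    · have hn1 : n = 1 := by omega
      subst hn1
      simp [toBinAux]
    · exact ih (n / 2) (Nat.div_lt_self (Nat.pos_of_ne_zero hn) (by norm_num)) h2 _

-- the common core: for n ≠ 0 both sides compute gA 0 (binary of n)
theorem alt_eq_gA (n : Nat) (hn : n ≠ 0) :
    (PySem.List.max? ((PySem.Chars.splitOn (PySem.Chars.stripChars (binNat n) ['0']) ['1']).map
        (fun r => (r.length : Int))) (fun x => x)).getD 0 = gA 0 (binNat n) := by
  have h01 : ∀ c ∈ binNat n, c = '0' ∨ c = '1' := by
    simp only [binNat, hn, if_neg, if_false]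
    exact toBinAux_01 n [] (by simp)
  have hhd : binNat n = [] ∨ ∃ t, binNat n = '1' :: t := by
    right
    simp only [binNat, hn, if_false]
    exact toBinAux_head n hn []
  rw [stripChars_eq _ hhd, splitOn_eq]
  set s := rstrip0 (binNat n) with hs
  obtain ⟨x, xs, hx⟩ : ∃ x xs, chunks [] s = x :: xs := by
    cases h : chunks [] s with
    | nil => exact absurd h (chunks_ne_nil s [])
    | cons x xs => exact ⟨x, xs, rfl⟩
  have hfold : ((chunks [] s).map (fun r => (r.length : Int))).foldl max 0 = gB 0 s := by
    have := chunks_fold s [] 0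
    simp only [List.length_nil, Nat.cast_zero] at this
    rw [this]
    have := gB_nonneg s 0 le_rfl
    omega
  rw [hx]
  simp only [List.map_cons, PySem.List.max?_id_cons, Option.getD_some]
  have key : List.foldl max ((x.length : Int)) (xs.map (fun r => (r.length : Int))) = gB 0 s := by
    rw [← hfold, hx]
    simp only [List.map_cons, List.foldl_cons]
    rw [show max (0:Int) ((x.length : Int)) = ((x.length : Int)) from by omega]
  rw [key]
  by_cases hsnil : s = []
  · have hz := (bridge (binNat n) h01 0 le_rfl).1 hsnil
    rw [hz, hsnil]
    try simp [gB]
  · exact ((bridge (binNat n) h01 0 le_rfl).2 hsnil).symm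

theorem sol_eq_gA (N : Int) (l : List Char) (hl : pyBin N = l ∨ pyBin N = 'b' :: l)
    (h01 : ∀ c ∈ l, c = '0' ∨ c = '1') : solution N = gA 0 l := by
  have hgaps : ∀ l', gapsOf 0 ('b' :: l') = gapsOf 0 l' := by intro l'; simp [gapsOf]
  have key : solution N = (gapsOf 0 l).foldl max 0 := by
    simp only [solution, solLoop_eq, List.nil_append]
    rcases hl with h | h <;> rw [h]
    · exact maxOrZero _ (mem_gapsOf_pos l 0)
    · rw [hgaps]
      exact maxOrZero _ (mem_gapsOf_pos l 0)
  rw [key, foldl_max_gapsOf l 0 0 le_rfl le_rfl]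
  have := gA_nonneg l 0 le_rfl
  omega

-- ===== VERDICT (by name: the statement is the Claim_ definition above) =====
theorem solution_spec : Claim_equal_solution := by
  intro N _
  unfold Spec_solution solution_alt
  by_cases h0 : N = 0
  · subst h0; decide
  · have hnabs : N.natAbs ≠ 0 := by omega
    rw [alt_eq_gA N.natAbs hnabs]
    have h01 : ∀ c ∈ binNat N.natAbs, c = '0' ∨ c = '1' := by
      simp only [binNat, hnabs, if_false]
      exact toBinAux_01 _ [] (by simp)
    refine sol_eq_gA N (binNat N.natAbs) ?_ h01
    by_cases hneg : N < 0
    · right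
      simp only [pyBin, hneg, if_pos]
      congr 2
      omega
    · left
      simp only [pyBin, hneg, if_neg, if_false]
      congr 1
      omega
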